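-- pv_equiv track=rewrite | github.com/yashwanthguguloth24/Algorithms | Mathematical/Game_of_digits.py | smallestK
-- ===== SOURCE A (Python) =====
-- def smallestK(n):
--     if (n >= 0 and n <= 9):
--         return n
--
--     digits = []
--     for i in range(9,1, -1):
--
--         while (n % i == 0):
--             digits.append(i)
--             n = n //i
--
--
--     if (n != 1):
--         return -1
--
--     k = 0
--     while (len(digits) != 0):
--
--         k = k * 10 + digits[-1]
--         digits.pop()
--
--     return k
-- ===== SOURCE B (Python) =====
-- def _strip(m, p):
--     c = 0
--     while m % p == 0:
--         m //= p
--         c += 1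
--     return m, c
--
-- def smallestK(n):
--     # Factor n into prime multiplicities of 2,3,5,7, then combine the counts
--     # arithmetically into digits (9s from pairs of 3s, 8s from triples of 2s, ...)
--     # and assemble them in ascending order.
--     if 0 <= n <= 9:
--         return n
--     if n < 0:
--         return -1
--     m, a = _strip(n, 2)
--     m, b = _strip(m, 3)
--     m, c5 = _strip(m, 5)
--     m, c7 = _strip(m, 7)
--     if m != 1:
--         return -1
--     nine, r3 = divmod(b, 2)
--     eight, r2 = divmod(a, 3)
--     six = min(r3, r2)
--     r3 -= six
--     r2 -= six
--     four, r2 = divmod(r2, 2)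
--     k = 0
--     for d, cnt in ((2, r2), (3, r3), (4, four), (5, c5), (6, six), (7, c7), (8, eight), (9, nine)):
--         for _ in range(cnt):
--             k = k * 10 + d
--     return k
-- ===== Notes on version B (the rewrite author's own statement) =====
-- stated objective: alternative
-- what changed: Instead of greedily trial-dividing by every digit from nine down to two while collecting a digit list, B computes the multiplicities of the four single-digit prime factors only and combines those counts arithmetically (nines from pairs of threes, eights from triples of twos, a six from a leftover two and three, fours from leftover pairs of twos) into digit counts assembled in ascending order.
import Mathlib
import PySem

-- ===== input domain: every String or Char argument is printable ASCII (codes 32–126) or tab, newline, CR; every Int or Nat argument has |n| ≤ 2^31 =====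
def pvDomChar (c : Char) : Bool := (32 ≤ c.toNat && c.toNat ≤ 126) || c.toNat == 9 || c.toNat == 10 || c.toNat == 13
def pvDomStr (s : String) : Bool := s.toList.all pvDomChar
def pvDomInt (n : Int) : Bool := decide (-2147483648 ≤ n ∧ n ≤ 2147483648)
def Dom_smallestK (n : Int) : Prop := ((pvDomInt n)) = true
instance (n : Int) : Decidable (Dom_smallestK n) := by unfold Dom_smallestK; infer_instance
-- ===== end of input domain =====

-- B replaces A's greedy trial division by all digits 9..2 with a prime-count
-- factorization (2,3,5,7) whose four counts are combined arithmetically into digits.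

-- termination helper for the trial-division while-loops (cited by decreasing_by)
theorem pvDivLt (n i : Int) (hi : 2 ≤ i) (hn : n ≠ 0) (hm : PySem.Int.mod n i = 0) :
    (PySem.Int.floordiv n i).natAbs < n.natAbs := by
  have hdvd : i ∣ n := (PySem.Int.mod_eq_zero_iff_dvd n i).mp hm
  rw [PySem.Int.floordiv_eq_ediv_of_pos (by omega)]
  obtain ⟨q, rfl⟩ := hdvd
  rw [Int.mul_ediv_cancel_left _ (by omega)]
  have hq : q ≠ 0 := by rintro rfl; simp at hn
  have h1 : 0 < q.natAbs := Int.natAbs_pos.mpr hq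
  have h2 : 2 ≤ i.natAbs := by omega
  have := Nat.mul_lt_mul_of_lt_of_le (show 1 < i.natAbs by omega) (le_refl q.natAbs) h1
  simpa [Int.natAbs_mul] using this

-- ===== PORT A =====
-- inner 'while (n % i == 0): digits.append(i); n = n // i'
def pvAWhile (i : Int) (digits : List Int) (n : Int) : List Int × Int :=
  if h : PySem.Int.mod n i = 0 ∧ 2 ≤ i ∧ n ≠ 0 then
    pvAWhile i (digits ++ [i]) (PySem.Int.floordiv n i)
  else (digits, n)
termination_by n.natAbs
decreasing_by exact pvDivLt n i h.2.1 h.2.2 h.1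

-- 'while (len(digits) != 0): k = k * 10 + digits[-1]; digits.pop()'
def pvPopLoop : List Int → Int → Int
  | [], k => k
  | d :: ds, k => pvPopLoop ((d :: ds).dropLast) (k * 10 + (d :: ds).getLast (by simp))
termination_by l _ => l.length
decreasing_by simp

def smallestK (n : Int) : Int :=
  if 0 ≤ n ∧ n ≤ 9 then n
  else
    let st := (PySem.List.pyRange 9 1 (-1)).foldl (fun st i => pvAWhile i st.1 st.2) ([], n)
    if st.2 ≠ 1 then -1 else pvPopLoop st.1 0

-- ===== PORT B =====
-- helper _strip(m, p): divide out all factors p, returning (m, count)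
def pvStrip (m p c : Int) : Int × Int :=
  if h : PySem.Int.mod m p = 0 ∧ 2 ≤ p ∧ m ≠ 0 then
    pvStrip (PySem.Int.floordiv m p) p (c + 1)
  else (m, c)
termination_by m.natAbs
decreasing_by exact pvDivLt m p h.2.1 h.2.2 h.1

-- 'for _ in range(cnt): k = k * 10 + d'
def pvRep (k d cnt : Int) : Int :=
  (PySem.List.pyRange 0 cnt 1).foldl (fun k _ => k * 10 + d) k

def smallestK_alt (n : Int) : Int :=
  if 0 ≤ n ∧ n ≤ 9 then n
  else if n < 0 then -1
  else
    let s1 := pvStrip n 2 0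
    let s2 := pvStrip s1.1 3 0
    let s3 := pvStrip s2.1 5 0
    let s4 := pvStrip s3.1 7 0
    if s4.1 ≠ 1 then -1
    else
      let nine := PySem.Int.floordiv s2.2 2
      let r3 := PySem.Int.mod s2.2 2
      let eight := PySem.Int.floordiv s1.2 3
      let r2 := PySem.Int.mod s1.2 3
      let six := min r3 r2
      let r3' := r3 - six
      let r2' := r2 - six
      let four := PySem.Int.floordiv r2' 2
      let r2'' := PySem.Int.mod r2' 2
      [((2:Int), r2''), (3, r3'), (4, four), (5, s3.2), (6, six), (7, s4.2), (8, eight), (9, nine)].foldl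
        (fun k p => pvRep k p.1 p.2) 0

-- ===== PRECONDITION & SPEC =====
def Spec_smallestK (n : Int) (out : Int) : Prop := out = smallestK_alt n
instance (n : Int) (out : Int) : Decidable (Spec_smallestK n out) := by unfold Spec_smallestK; infer_instance

-- ===== CLAIM (what is proved, stated in full; the proofs are below) =====
def Claim_equal_smallestK : Prop := ∀ (n : Int), Dom_smallestK n → Spec_smallestK n (smallestK n)

-- ===== LEMMAS AND PROOFS =====

theorem pvAWhile_spec_aux (N : ℕ) : ∀ (i n : Int), n.natAbs ≤ N → 2 ≤ i → n ≠ 0 → ∀ ds : List Int,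
    ∃ (k : ℕ) (r : Int), pvAWhile i ds n = (ds ++ List.replicate k i, r) ∧ n = i ^ k * r ∧ ¬ i ∣ r := by
  induction N with
  | zero => intro i n hN hi hn ds; exact absurd (Int.natAbs_eq_zero.mp (by omega)) hn
  | succ N ih =>
    intro i n hN hi hn ds
    rw [pvAWhile]
    by_cases h : PySem.Int.mod n i = 0 ∧ 2 ≤ i ∧ n ≠ 0
    · rw [dif_pos h]
      have hdvd : i ∣ n := (PySem.Int.mod_eq_zero_iff_dvd n i).mp h.1
      have hlt := pvDivLt n i hi hn h.1
      have hfd : PySem.Int.floordiv n i = n / i := PySem.Int.floordiv_eq_ediv_of_pos (by omega)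
      have hmul : i * (n / i) = n := Int.mul_ediv_cancel' hdvd
      have hne : n / i ≠ 0 := by rintro h0; rw [h0, mul_zero] at hmul; exact hn hmul.symm
      obtain ⟨k, r, heq, hrep, hnd⟩ := ih i (n / i) (by omega) hi hne (ds ++ [i])
      refine ⟨k + 1, r, ?_, ?_, hnd⟩
      · rw [hfd, heq]; simp [List.replicate_succ]
      · rw [← hmul, hrep]; ring
    · rw [dif_neg h]
      have hmod : PySem.Int.mod n i ≠ 0 := by
        intro h0; exact h ⟨h0, hi, hn⟩
      refine ⟨0, n, by simp, by simp, ?_⟩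
      intro hdvd
      exact hmod ((PySem.Int.mod_eq_zero_iff_dvd n i).mpr hdvd)

theorem pvAWhile_spec (i n : Int) (hi : 2 ≤ i) (hn : n ≠ 0) (ds : List Int) :
    ∃ (k : ℕ) (r : Int), pvAWhile i ds n = (ds ++ List.replicate k i, r) ∧ n = i ^ k * r ∧ ¬ i ∣ r :=
  pvAWhile_spec_aux n.natAbs i n le_rfl hi hn ds

theorem pvStrip_spec_aux (N : ℕ) : ∀ (p m : Int), m.natAbs ≤ N → 2 ≤ p → m ≠ 0 → ∀ c : Int,
    ∃ (k : ℕ) (r : Int), pvStrip m p c = (r, c + (k : Int)) ∧ m = p ^ k * r ∧ ¬ p ∣ r := by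
  induction N with
  | zero => intro p m hN hp hm c; exact absurd (Int.natAbs_eq_zero.mp (by omega)) hm
  | succ N ih =>
    intro p m hN hp hm c
    rw [pvStrip]
    by_cases h : PySem.Int.mod m p = 0 ∧ 2 ≤ p ∧ m ≠ 0
    · rw [dif_pos h]
      have hdvd : p ∣ m := (PySem.Int.mod_eq_zero_iff_dvd m p).mp h.1
      have hlt := pvDivLt m p hp hm h.1
      have hfd : PySem.Int.floordiv m p = m / p := PySem.Int.floordiv_eq_ediv_of_pos (by omega)
      have hmul : p * (m / p) = m := Int.mul_ediv_cancel' hdvd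
      have hne : m / p ≠ 0 := by rintro h0; rw [h0, mul_zero] at hmul; exact hm hmul.symm
      obtain ⟨k, r, heq, hrep, hnd⟩ := ih p (m / p) (by omega) hp hne (c + 1)
      refine ⟨k + 1, r, ?_, ?_, hnd⟩
      · rw [hfd, heq]; push_cast; ring_nf
      · rw [← hmul, hrep]; ring
    · rw [dif_neg h]
      have hmod : PySem.Int.mod m p ≠ 0 := by intro h0; exact h ⟨h0, hp, hm⟩
      refine ⟨0, m, by simp, by simp, ?_⟩
      intro hdvd
      exact hmod ((PySem.Int.mod_eq_zero_iff_dvd m p).mpr hdvd)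

theorem pvStrip_spec (p m : Int) (hp : 2 ≤ p) (hm : m ≠ 0) (c : Int) :
    ∃ (k : ℕ) (r : Int), pvStrip m p c = (r, c + (k : Int)) ∧ m = p ^ k * r ∧ ¬ p ∣ r :=
  pvStrip_spec_aux m.natAbs p m le_rfl hp hm c

-- uniqueness of stripping one factor
theorem pvStripUnique (p : Int) (hp : 2 ≤ p) :
    ∀ (a a' : ℕ) (X X' : Int), ¬ p ∣ X → ¬ p ∣ X' → p ^ a * X = p ^ a' * X' → a = a' ∧ X = X' := by
  intro a
  induction a with
  | zero =>
    intro a' X X' hX hX' h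
    cases a' with
    | zero => simpa using h
    | succ a' =>
      exfalso; apply hX
      rw [pow_zero, one_mul] at h
      exact ⟨p ^ a' * X', by rw [h, pow_succ]; ring⟩
  | succ a ih =>
    intro a' X X' hX hX' h
    cases a' with
    | zero =>
      exfalso; apply hX'
      rw [pow_zero, one_mul] at h
      exact ⟨p ^ a * X, by rw [← h, pow_succ]; ring⟩
    | succ a' =>
      have h' : p * (p ^ a * X) = p * (p ^ a' * X') := by
        rw [pow_succ, pow_succ] at h; ring_nf at h ⊢; linarith [h]
      have := ih a' X X' hX hX' (mul_left_cancel₀ (by omega : (p:Int) ≠ 0) h')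
      exact ⟨by omega, this.2⟩

theorem pvNotDvdMul (p x y : Int) (hp : Prime p) (hx : ¬ p ∣ x) (hy : ¬ p ∣ y) : ¬ p ∣ x * y :=
  fun h => (hp.dvd_mul.mp h).elim hx hy

theorem pvNotDvdPow (p q : Int) (hp : Prime p) (hq : ¬ p ∣ q) (k : ℕ) : ¬ p ∣ q ^ k :=
  fun h => hq (hp.dvd_of_dvd_pow h)

-- pvPopLoop over a snoc peels the last element
theorem pvPopLoop_concat (ds : List Int) (d k : Int) :
    pvPopLoop (ds ++ [d]) k = pvPopLoop ds (k * 10 + d) := by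
  cases ds with
  | nil => simp [pvPopLoop]
  | cons e es =>
    rw [show (e :: es) ++ [d] = e :: (es ++ [d]) by simp, pvPopLoop]
    have h1 : (e :: (es ++ [d])).dropLast = e :: es := by
      rw [← List.cons_append]; exact List.dropLast_concat
    have h2 : (e :: (es ++ [d])).getLast (by simp) = d := by
      rw [List.getLast_cons (by simp)]; exact List.getLast_concat
    rw [h1, h2]

theorem pvPopLoop_eq_foldl (ds : List Int) : ∀ k : Int,
    pvPopLoop ds k = ds.reverse.foldl (fun k d => k * 10 + d) k := by
  induction ds using List.reverseRecOn with
  | nil => intro k; simp [pvPopLoop]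
  | append_singleton ds d ih =>
    intro k
    rw [pvPopLoop_concat, ih, List.reverse_append]
    simp

theorem pvRep_eq (d : Int) (q : ℕ) : ∀ k : Int,
    pvRep k d (q : Int) = (List.replicate q d).foldl (fun k x => k * 10 + x) k := by
  induction q with
  | zero => intro k; simp [pvRep]
  | succ q ih =>
    intro k
    rw [show ((q + 1 : ℕ) : Int) = (q : Int) + 1 by push_cast; ring]
    unfold pvRep
    rw [PySem.List.pyRange_one_succ_right (by positivity), List.foldl_append,
        List.replicate_succ', List.foldl_append]
    have h := ih k
    unfold pvRep at h
    rw [h]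
    simp

-- the four prime counts determine each digit count of the 9..2 sweep
theorem pvCounts (q2 q3 q4 q5 q6 q7 q8 q9 : ℕ) (c1 : q6 + q3 ≤ 1) (c2 : q6 + 2*q4 + q2 ≤ 2)
    (c3 : q3 = 0 ∨ (q4 = 0 ∧ q2 = 0)) (c4 : q2 ≤ 1) :
    PySem.Int.mod (PySem.Int.mod ((3*q8+q6+2*q4+q2 : ℕ) : Int) 3 -
        min (PySem.Int.mod ((2*q9+q6+q3 : ℕ) : Int) 2) (PySem.Int.mod ((3*q8+q6+2*q4+q2 : ℕ) : Int) 3)) 2 = (q2 : Int)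
    ∧ PySem.Int.mod ((2*q9+q6+q3 : ℕ) : Int) 2 -
        min (PySem.Int.mod ((2*q9+q6+q3 : ℕ) : Int) 2) (PySem.Int.mod ((3*q8+q6+2*q4+q2 : ℕ) : Int) 3) = (q3 : Int)
    ∧ PySem.Int.floordiv (PySem.Int.mod ((3*q8+q6+2*q4+q2 : ℕ) : Int) 3 -
        min (PySem.Int.mod ((2*q9+q6+q3 : ℕ) : Int) 2) (PySem.Int.mod ((3*q8+q6+2*q4+q2 : ℕ) : Int) 3)) 2 = (q4 : Int)
    ∧ min (PySem.Int.mod ((2*q9+q6+q3 : ℕ) : Int) 2) (PySem.Int.mod ((3*q8+q6+2*q4+q2 : ℕ) : Int) 3) = (q6 : Int)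
    ∧ PySem.Int.floordiv ((3*q8+q6+2*q4+q2 : ℕ) : Int) 3 = (q8 : Int)
    ∧ PySem.Int.floordiv ((2*q9+q6+q3 : ℕ) : Int) 2 = (q9 : Int) := by
  have hfd2 : ∀ x : Int, PySem.Int.floordiv x 2 = x / 2 := fun x => PySem.Int.floordiv_eq_ediv_of_pos (by norm_num)
  have hfd3 : ∀ x : Int, PySem.Int.floordiv x 3 = x / 3 := fun x => PySem.Int.floordiv_eq_ediv_of_pos (by norm_num)
  have hmd2 : ∀ x : Int, PySem.Int.mod x 2 = x % 2 := fun x => PySem.Int.mod_eq_emod_of_pos (by norm_num)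
  have hmd3 : ∀ x : Int, PySem.Int.mod x 3 = x % 3 := fun x => PySem.Int.mod_eq_emod_of_pos (by norm_num)
  simp only [hfd2, hfd3, hmd2, hmd3]
  have e1 : ((2*q9+q6+q3 : ℕ) : Int) % 2 = (q6 : Int) + q3 := by push_cast; omega
  have e2 : ((3*q8+q6+2*q4+q2 : ℕ) : Int) % 3 = (q6 : Int) + 2*q4 + q2 := by push_cast; omega
  simp only [e1, e2]
  push_cast
  have hq6 : q6 ≤ 1 := by omega
  have hq3 : q3 ≤ 1 := by omega
  have hq4 : q4 ≤ 1 := by omega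
  rcases c3 with h30 | ⟨h40, h20⟩ <;> interval_cases q6 <;> interval_cases q3 <;>
    interval_cases q4 <;> interval_cases q2 <;>
    refine ⟨?_, ?_, ?_, ?_, ?_, ?_⟩ <;> norm_num <;> omega

-- characterization of A's 9..2 sweep for any nonzero n
theorem pvSweep (n : Int) (hn : n ≠ 0) :
    ∃ (q9 q8 q7 q6 q5 q4 q3 q2 : ℕ) (r : Int),
      (PySem.List.pyRange 9 1 (-1)).foldl (fun st i => pvAWhile i st.1 st.2) ([], n)
        = (List.replicate q9 9 ++ List.replicate q8 8 ++ List.replicate q7 7 ++ List.replicate q6 6 ++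
           List.replicate q5 5 ++ List.replicate q4 4 ++ List.replicate q3 3 ++ List.replicate q2 2, r)
      ∧ n = 2 ^ (3*q8+q6+2*q4+q2) * (3 ^ (2*q9+q6+q3) * (5 ^ q5 * (7 ^ q7 * r)))
      ∧ ¬ (2:Int) ∣ r ∧ ¬ (3:Int) ∣ r ∧ ¬ (5:Int) ∣ r ∧ ¬ (7:Int) ∣ r
      ∧ q6 + q3 ≤ 1 ∧ q6 + 2*q4 + q2 ≤ 2 ∧ (q3 = 0 ∨ (q4 = 0 ∧ q2 = 0)) ∧ q2 ≤ 1 := by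
  have hrange : PySem.List.pyRange 9 1 (-1) = [9,8,7,6,5,4,3,2] := by
    rw [PySem.List.pyRange_neg_one]; rfl
  rw [hrange]
  simp only [List.foldl]
  obtain ⟨q9, r9, h9, e9, nd9⟩ := pvAWhile_spec 9 n (by norm_num) hn []
  have hr9 : r9 ≠ 0 := fun h => hn (by rw [e9, h, mul_zero])
  rw [h9]
  obtain ⟨q8, r8, h8, e8, nd8⟩ := pvAWhile_spec 8 r9 (by norm_num) hr9 ([] ++ List.replicate q9 9)
  have hr8 : r8 ≠ 0 := fun h => hr9 (by rw [e8, h, mul_zero])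
  rw [h8]
  obtain ⟨q7, r7, h7, e7, nd7⟩ := pvAWhile_spec 7 r8 (by norm_num) hr8 _
  have hr7 : r7 ≠ 0 := fun h => hr8 (by rw [e7, h, mul_zero])
  rw [h7]
  obtain ⟨q6, r6, h6, e6, nd6⟩ := pvAWhile_spec 6 r7 (by norm_num) hr7 _
  have hr6 : r6 ≠ 0 := fun h => hr7 (by rw [e6, h, mul_zero])
  rw [h6]
  obtain ⟨q5, r5, h5, e5, nd5⟩ := pvAWhile_spec 5 r6 (by norm_num) hr6 _
  have hr5 : r5 ≠ 0 := fun h => hr6 (by rw [e5, h, mul_zero])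
  rw [h5]
  obtain ⟨q4, r4, h4, e4, nd4⟩ := pvAWhile_spec 4 r5 (by norm_num) hr5 _
  have hr4 : r4 ≠ 0 := fun h => hr5 (by rw [e4, h, mul_zero])
  rw [h4]
  obtain ⟨q3, r3, h3, e3, nd3⟩ := pvAWhile_spec 3 r4 (by norm_num) hr4 _
  have hr3 : r3 ≠ 0 := fun h => hr4 (by rw [e3, h, mul_zero])
  rw [h3]
  obtain ⟨q2, r2, h2, e2, nd2⟩ := pvAWhile_spec 2 r3 (by norm_num) hr3 _
  rw [h2]
  have h9p : (9:Int) ^ q9 = 3 ^ (2*q9) := by rw [show (9:Int) = 3 ^ 2 by norm_num, ← pow_mul]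
  have h8p : (8:Int) ^ q8 = 2 ^ (3*q8) := by rw [show (8:Int) = 2 ^ 3 by norm_num, ← pow_mul]
  have h6p : (6:Int) ^ q6 = 2 ^ q6 * 3 ^ q6 := by rw [show (6:Int) = 2 * 3 by norm_num, mul_pow]
  have h4p : (4:Int) ^ q4 = 2 ^ (2*q4) := by rw [show (4:Int) = 2 ^ 2 by norm_num, ← pow_mul]
  refine ⟨q9, q8, q7, q6, q5, q4, q3, q2, r2, by simp, ?_, nd2, ?_, ?_, ?_, ?_, ?_, ?_, ?_⟩
  · -- prime-basis identity
    rw [e2] at e3; rw [e3] at e4; rw [e4] at e5; rw [e5] at e6; rw [e6] at e7; rw [e7] at e8; rw [e8] at e9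
    rw [h9p, h8p, h6p, h4p] at e9
    rw [e9]; ring
  · -- ¬3 ∣ r2
    intro h; apply nd3; rw [e2]; exact h.mul_left _
  · -- ¬5 ∣ r2
    intro h; apply nd5; rw [e4, e3, e2]
    exact ((h.mul_left _).mul_left _).mul_left _
  · -- ¬7 ∣ r2
    intro h; apply nd7; rw [e6, e5, e4, e3, e2]
    exact ((((h.mul_left _).mul_left _).mul_left _).mul_left _).mul_left _
  · -- q6 + q3 ≤ 1
    by_contra hc
    obtain ⟨t, ht⟩ : ∃ t, q6 + q3 = t + 2 := ⟨q6 + q3 - 2, by omega⟩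
    apply nd9
    have f9 : r9 = 3 ^ (q6+q3) * (2 ^ (3*q8+q6+2*q4+q2) * (5 ^ q5 * (7 ^ q7 * r2))) := by
      rw [e8, e7, e6, e5, e4, e3, e2, h8p, h6p, h4p]; ring
    have hp : (3:Int) ^ (t+2) = 3 ^ t * 9 := by rw [pow_add]; norm_num
    exact ⟨3 ^ t * (2 ^ (3*q8+q6+2*q4+q2) * (5 ^ q5 * (7 ^ q7 * r2))), by rw [f9, ht, hp]; ring⟩
  · -- q6 + 2*q4 + q2 ≤ 2
    by_contra hc
    obtain ⟨t, ht⟩ : ∃ t, q6 + 2*q4 + q2 = t + 3 := ⟨q6 + 2*q4 + q2 - 3, by omega⟩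
    apply nd8
    have f8 : r8 = 2 ^ (q6+2*q4+q2) * (3 ^ (q6+q3) * (5 ^ q5 * (7 ^ q7 * r2))) := by
      rw [e7, e6, e5, e4, e3, e2, h6p, h4p]; ring
    have hp : (2:Int) ^ (t+3) = 2 ^ t * 8 := by rw [pow_add]; norm_num
    exact ⟨2 ^ t * (3 ^ (q6+q3) * (5 ^ q5 * (7 ^ q7 * r2))), by rw [f8, ht, hp]; ring⟩
  · -- q3 = 0 ∨ (q4 = 0 ∧ q2 = 0)
    by_contra hc
    push_neg at hc
    obtain ⟨hc3, hc42⟩ := hc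
    obtain ⟨t, ht⟩ : ∃ t, 2*q4 + q2 = t + 1 := ⟨2*q4 + q2 - 1, by omega⟩
    obtain ⟨u, hu⟩ : ∃ u, q3 = u + 1 := ⟨q3 - 1, by omega⟩
    apply nd6
    have f6 : r6 = 2 ^ (2*q4+q2) * (3 ^ q3 * (5 ^ q5 * r2)) := by
      rw [e5, e4, e3, e2, h4p]; ring
    exact ⟨2 ^ t * (3 ^ u * (5 ^ q5 * r2)), by rw [f6, ht, hu, pow_succ, pow_succ]; ring⟩
  · -- q2 ≤ 1
    by_contra hc
    obtain ⟨t, ht⟩ : ∃ t, q2 = t + 2 := ⟨q2 - 2, by omega⟩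
    apply nd4
    have f4 : r4 = 2 ^ q2 * (3 ^ q3 * r2) := by rw [e3, e2]; ring
    have hp : (2:Int) ^ (t+2) = 2 ^ t * 4 := by rw [pow_add]; norm_num
    exact ⟨2 ^ t * (3 ^ q3 * r2), by rw [f4, ht, hp]; ring⟩

-- ===== VERDICT (by name: the statement is the Claim_ definition above) =====
theorem smallestK_spec : Claim_equal_smallestK := by
  intro n _
  unfold Spec_smallestK smallestK smallestK_alt
  by_cases h09 : 0 ≤ n ∧ n ≤ 9
  · rw [if_pos h09, if_pos h09]
  · rw [if_neg h09, if_neg h09]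
    have hn : n ≠ 0 := by omega
    obtain ⟨q9, q8, q7, q6, q5, q4, q3, q2, r, hfold, hfac, nd2r, nd3r, nd5r, nd7r, c1, c2, c3, c4⟩ :=
      pvSweep n hn
    by_cases hneg : n < 0
    · rw [if_pos hneg]
      have hr1 : r ≠ 1 := by
        intro h1
        rw [h1] at hfac
        have : (0:Int) < 2 ^ (3*q8+q6+2*q4+q2) * (3 ^ (2*q9+q6+q3) * (5 ^ q5 * (7 ^ q7 * 1))) := by positivity
        omega
      simp only [hfold]
      rw [if_pos hr1]
    · rw [if_neg hneg]
      have hpos : 0 < n := by omega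
      obtain ⟨a, m1, hs1, ea, nda⟩ := pvStrip_spec 2 n (by norm_num) hn 0
      have hm1 : m1 ≠ 0 := fun h => hn (by rw [ea, h, mul_zero])
      obtain ⟨b, m2, hs2, eb, ndb⟩ := pvStrip_spec 3 m1 (by norm_num) hm1 0
      have hm2 : m2 ≠ 0 := fun h => hm1 (by rw [eb, h, mul_zero])
      obtain ⟨c, m3, hs3, ec, ndc⟩ := pvStrip_spec 5 m2 (by norm_num) hm2 0
      have hm3 : m3 ≠ 0 := fun h => hm2 (by rw [ec, h, mul_zero])
      obtain ⟨d, m4, hs4, ed, ndd⟩ := pvStrip_spec 7 m3 (by norm_num) hm3 0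
      have p2 : Prime (2:Int) := Int.prime_two
      have p3 : Prime (3:Int) := Int.prime_three
      have p5 : Prime (5:Int) := by norm_num
      have p7 : Prime (7:Int) := by norm_num
      have n23 : ¬ (2:Int) ∣ 3 := by decide
      have n25 : ¬ (2:Int) ∣ 5 := by decide
      have n27 : ¬ (2:Int) ∣ 7 := by decide
      have n35 : ¬ (3:Int) ∣ 5 := by decide
      have n37 : ¬ (3:Int) ∣ 7 := by decide
      have n57 : ¬ (5:Int) ∣ 7 := by decide
      have h2u := pvStripUnique 2 (by norm_num) (3*q8+q6+2*q4+q2) a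
        (3 ^ (2*q9+q6+q3) * (5 ^ q5 * (7 ^ q7 * r))) m1
        (pvNotDvdMul 2 _ _ p2 (pvNotDvdPow 2 3 p2 n23 _)
          (pvNotDvdMul 2 _ _ p2 (pvNotDvdPow 2 5 p2 n25 _)
            (pvNotDvdMul 2 _ _ p2 (pvNotDvdPow 2 7 p2 n27 _) nd2r))) nda
        (by rw [← hfac, ← ea])
      obtain ⟨ha, hX2⟩ := h2u
      have h3u := pvStripUnique 3 (by norm_num) (2*q9+q6+q3) b (5 ^ q5 * (7 ^ q7 * r)) m2
        (pvNotDvdMul 3 _ _ p3 (pvNotDvdPow 3 5 p3 n35 _)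
          (pvNotDvdMul 3 _ _ p3 (pvNotDvdPow 3 7 p3 n37 _) nd3r)) ndb
        (by rw [hX2]; exact eb)
      obtain ⟨hb, hX3⟩ := h3u
      have h5u := pvStripUnique 5 (by norm_num) q5 c (7 ^ q7 * r) m3
        (pvNotDvdMul 5 _ _ p5 (pvNotDvdPow 5 7 p5 n57 _) nd5r) ndc
        (by rw [hX3]; exact ec)
      obtain ⟨hc, hX5⟩ := h5u
      have h7u := pvStripUnique 7 (by norm_num) q7 d r m4 nd7r ndd (by rw [hX5]; exact ed)
      obtain ⟨hd, hX7⟩ := h7u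
      simp only [hfold, hs1, hs2, hs3, hs4]
      rw [← hX7]
      by_cases hr1 : r ≠ 1
      · rw [if_pos hr1, if_pos hr1]
      · rw [if_neg hr1, if_neg hr1]
        push_neg at hr1
        subst hr1
        subst ha hb hc hd
        simp only [zero_add]
        obtain ⟨w2, w3, w4, w6, w8, w9⟩ := pvCounts q2 q3 q4 q5 q6 q7 q8 q9 c1 c2 c3 c4
        rw [w2, w3, w4, w6, w8, w9]
        rw [pvPopLoop_eq_foldl]
        simp only [List.reverse_append, List.reverse_replicate, List.foldl_append,
          List.foldl_cons, List.foldl_nil, pvRep_eq]
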